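-- pv_equiv track=rewrite | github.com/Wu-GQ/PythonDemos | LeetCode/LeetCode_Number.py | hasGroupsSizeX
-- ===== SOURCE A (Python) =====
-- import math
--
-- def hasGroupsSizeX(deck: list) -> bool:
--     """
--     914. 卡牌分组
--     :see https://leetcode-cn.com/problems/x-of-a-kind-in-a-deck-of-cards/
--     """
--     if len(deck) < 2:
--         return False
--
--     count_dict = {}
--     for i in deck:
--         count_dict[i] = count_dict.get(i, 0) + 1
--
--     gcd_result = count_dict[deck[0]]
--     for i in count_dict.values():
--         gcd_result = math.gcd(gcd_result, i)
--         if gcd_result < 2: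
--             return False
--     return gcd_result >= 2
-- ===== SOURCE B (Python) =====
-- def hasGroupsSizeX(deck: list) -> bool:
--     if len(deck) < 2:
--         return False
--
--     counts = {}
--     for c in deck:
--         counts[c] = counts.get(c, 0) + 1
--
--     vals = list(counts.values())
--     m = min(vals)
--     for x in range(2, m + 1):
--         if all(v % x == 0 for v in vals):
--             return True
--     return False
-- ===== Notes on version B (the rewrite author's own statement) =====
-- stated objective: alternative
-- what changed: Replaces the early-exit running-gcd over the counts by a direct search: take the minimum count m and test each candidate group size x in 2..m for dividing every count, returning at the first hit.
import Mathlib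
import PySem

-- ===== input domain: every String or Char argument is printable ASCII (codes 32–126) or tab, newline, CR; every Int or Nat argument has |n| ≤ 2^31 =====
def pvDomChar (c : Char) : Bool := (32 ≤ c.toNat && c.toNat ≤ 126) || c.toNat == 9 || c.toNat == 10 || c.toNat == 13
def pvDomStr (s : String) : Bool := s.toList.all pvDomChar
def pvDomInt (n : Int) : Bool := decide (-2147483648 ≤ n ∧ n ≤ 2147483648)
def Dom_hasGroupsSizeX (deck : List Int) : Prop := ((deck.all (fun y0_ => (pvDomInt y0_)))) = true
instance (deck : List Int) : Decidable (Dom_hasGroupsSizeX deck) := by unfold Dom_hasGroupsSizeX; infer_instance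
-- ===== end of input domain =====

-- B replaces A's early-exit running-gcd over the counts by a direct search for a common
-- divisor x in 2..min(counts); objective: alternative (same result, different algorithm).

-- ===== PORT A =====
-- the 'for i in count_dict.values(): gcd_result = math.gcd(...); if gcd_result < 2: return False'
-- loop with its trailing 'return gcd_result >= 2'
def pvGcdLoopA (g : Int) : List Int → Bool
  | [] => decide (2 ≤ g)
  | v :: rest =>
    let g' : Int := ((Int.gcd g v : Nat) : Int)   -- math.gcd (nonnegative result, exact)
    if g' < 2 then false else pvGcdLoopA g' rest

def hasGroupsSizeX (deck : List Int) : Bool :=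
  if deck.length < 2 then false
  else
    -- count_dict built by the for-loop
    let cd : PySem.Dict Int Int := deck.foldl (fun d i => d.insert i (d.getD i 0 + 1)) PySem.Dict.empty
    -- count_dict[deck[0]]: the guard makes deck nonempty, so deck[0] = headI and the key is present (getD exact here)
    pvGcdLoopA (cd.getD deck.headI 0) cd.values

-- ===== PORT B =====
-- 'for x in range(2, m+1): if all(v % x == 0 for v in vals): return True' then 'return False'
def pvDivLoopB (vals : List Int) : List Int → Bool
  | [] => false
  | x :: rest =>
    if vals.all (fun v => PySem.Int.mod v x == 0) then true else pvDivLoopB vals rest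

def hasGroupsSizeX_alt (deck : List Int) : Bool :=
  if deck.length < 2 then false
  else
    let cd : PySem.Dict Int Int := deck.foldl (fun d i => d.insert i (d.getD i 0 + 1)) PySem.Dict.empty
    let vals := cd.values
    match PySem.List.min? vals (fun v => v) with  -- min(vals); vals nonempty under the guard (min raises only on empty)
    | none => false
    | some m => pvDivLoopB vals (PySem.List.pyRange 2 (m + 1) 1)

-- ===== PRECONDITION & SPEC =====
def Spec_hasGroupsSizeX (deck : List Int) (out : Bool) : Prop := out = hasGroupsSizeX_alt deck
instance (deck : List Int) (out : Bool) : Decidable (Spec_hasGroupsSizeX deck out) := by unfold Spec_hasGroupsSizeX; infer_instance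

-- ===== CLAIM (what is proved, stated in full; the proofs are below) =====
def Claim_equal_hasGroupsSizeX : Prop := ∀ (deck : List Int), Dom_hasGroupsSizeX deck → Spec_hasGroupsSizeX deck (hasGroupsSizeX deck)

-- ===== LEMMAS AND PROOFS =====

-- the running gcd of A's loop, without the early exit
def pvFoldGcd (g : Int) (l : List Int) : Int := l.foldl (fun a v => ((Int.gcd a v : Nat) : Int)) g

lemma pvFoldGcd_one (l : List Int) : pvFoldGcd 1 l = 1 := by
  induction l with
  | nil => rfl
  | cons v rest ih => simpa [pvFoldGcd, Int.one_gcd] using ih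

lemma pvGcd_pos (g v : Int) (hg : 1 ≤ g) : 1 ≤ ((Int.gcd g v : Nat) : Int) := by
  have : g ≠ 0 := by omega
  have : Int.gcd g v ≠ 0 := by simp [Int.gcd_eq_zero_iff, this]
  omega

lemma pvFoldGcd_pos (l : List Int) (g : Int) (hg : 1 ≤ g) : 1 ≤ pvFoldGcd g l := by
  induction l generalizing g with
  | nil => simpa [pvFoldGcd] using hg
  | cons v rest ih => simpa [pvFoldGcd] using ih _ (pvGcd_pos g v hg)

lemma pvGcdLoopA_eq (l : List Int) (g : Int) (hg : 1 ≤ g) :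
    pvGcdLoopA g l = decide (2 ≤ pvFoldGcd g l) := by
  induction l generalizing g with
  | nil => simp [pvGcdLoopA, pvFoldGcd]
  | cons v rest ih =>
    have hg' := pvGcd_pos g v hg
    by_cases h : ((Int.gcd g v : Nat) : Int) < 2
    · have h1 : ((Int.gcd g v : Nat) : Int) = 1 := by omega
      have hfold : pvFoldGcd g (v :: rest) = 1 := by
        simp only [pvFoldGcd, List.foldl_cons]
        rw [h1]
        exact pvFoldGcd_one rest
      simp [pvGcdLoopA, h, hfold]
    · simp only [pvGcdLoopA, if_neg h]
      simpa [pvFoldGcd] using ih _ hg'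

lemma pvFoldGcd_dvd_init (l : List Int) (g : Int) : pvFoldGcd g l ∣ g := by
  induction l generalizing g with
  | nil => simp [pvFoldGcd]
  | cons v rest ih =>
    have := ih ((Int.gcd g v : Nat) : Int)
    exact dvd_trans (by simpa [pvFoldGcd] using this) (Int.gcd_dvd_left g v)

lemma pvFoldGcd_dvd_mem (l : List Int) (g v : Int) (hv : v ∈ l) : pvFoldGcd g l ∣ v := by
  induction l generalizing g with
  | nil => cases hv
  | cons w rest ih =>
    rcases List.mem_cons.mp hv with h | h
    · subst h
      exact dvd_trans (by simpa [pvFoldGcd] using pvFoldGcd_dvd_init rest ((Int.gcd g v : Nat) : Int))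
        (Int.gcd_dvd_right g v)
    · simpa [pvFoldGcd] using ih _ h

lemma pvDvd_foldGcd (l : List Int) (g x : Int) (hgx : x ∣ g) (hl : ∀ v ∈ l, x ∣ v) :
    x ∣ pvFoldGcd g l := by
  induction l generalizing g with
  | nil => simpa [pvFoldGcd] using hgx
  | cons v rest ih =>
    have : x ∣ ((Int.gcd g v : Nat) : Int) := Int.dvd_coe_gcd hgx (hl v (List.mem_cons_self ..))
    simpa [pvFoldGcd] using ih _ this (fun w hw => hl w (List.mem_cons_of_mem _ hw))

lemma pvDivLoopB_eq (vals l : List Int) :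
    pvDivLoopB vals l = l.any (fun x => vals.all (fun v => PySem.Int.mod v x == 0)) := by
  induction l with
  | nil => rfl
  | cons x rest ih => by_cases h : vals.all (fun v => PySem.Int.mod v x == 0) <;> simp [pvDivLoopB, h, ih]

-- ===== VERDICT (by name: the statement is the Claim_ definition above) =====
theorem hasGroupsSizeX_spec : Claim_equal_hasGroupsSizeX := by
  intro deck _
  unfold Spec_hasGroupsSizeX hasGroupsSizeX hasGroupsSizeX_alt
  by_cases hlen : deck.length < 2
  · simp [hlen]
  · simp only [if_neg hlen]
    have hne : deck ≠ [] := by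
      intro h; subst h; simp at hlen
    -- the dict is the counter of deck
    have hcd : deck.foldl (fun d i => d.insert i (d.getD i 0 + 1)) PySem.Dict.empty
        = PySem.Dict.counter deck := PySem.Dict.foldl_insert_getD_add_one_eq_counter deck
    rw [hcd]
    set vals := (PySem.Dict.counter deck).values with hvals
    -- every value is a positive count
    have hvals_eq : vals = (PySem.Set.ofList deck).map (fun k => (deck.count k : Int)) := by
      rw [hvals]
      have : (PySem.Dict.counter deck).values = (PySem.Dict.counter deck).items.map (·.2) := rfl
      rw [this, PySem.Dict.items_counter, List.map_map]
      simp [Function.comp]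
    have hpos : ∀ v ∈ vals, 1 ≤ v := by
      intro v hv
      rw [hvals_eq] at hv
      rcases List.mem_map.mp hv with ⟨k, hk, rfl⟩
      have : k ∈ deck := (PySem.Set.mem_ofList deck k).mp hk
      have : 1 ≤ deck.count k := List.count_pos_iff.mpr this
      exact_mod_cast this
    -- the initial gcd value is a member of vals
    have hg0 : (PySem.Dict.counter deck).getD deck.headI 0 = (deck.count deck.headI : Int) :=
      PySem.Dict.getD_counter deck deck.headI
    have hg0mem : (deck.count deck.headI : Int) ∈ vals := by
      rw [hvals_eq]
      exact List.mem_map.mpr ⟨deck.headI, (PySem.Set.mem_ofList deck deck.headI).mpr (by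
        cases deck with
        | nil => exact absurd rfl hne
        | cons a t => exact List.mem_cons_self ..), rfl⟩
    have hg0pos : (1 : Int) ≤ (deck.count deck.headI : Int) := hpos _ hg0mem
    -- vals is nonempty, so min? returns its minimum m
    have hvne : vals ≠ [] := by
      intro h; rw [h] at hg0mem; cases hg0mem
    obtain ⟨m, hm⟩ : ∃ m, PySem.List.min? vals (fun v => v) = some m := by
      cases h : PySem.List.min? vals (fun v => v) with
      | none => exact absurd ((PySem.List.min?_eq_none_iff vals (fun v => v)).mp h) hvne
      | some m => exact ⟨m, rfl⟩
    have hmmem : m ∈ vals := PySem.List.min?_mem hm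
    have hmmin : ∀ y ∈ vals, m ≤ y := by
      intro y hy; exact PySem.List.min?_isMin hm y hy
    have hmpos : (1 : Int) ≤ m := hpos _ hmmem
    simp only [hm, hg0]
    -- rewrite both loops
    rw [pvGcdLoopA_eq vals _ hg0pos, pvDivLoopB_eq]
    set G := pvFoldGcd (deck.count deck.headI : Int) vals with hG
    have hGpos : 1 ≤ G := pvFoldGcd_pos vals _ hg0pos
    -- Bool equality via iff of the two propositions
    rw [Bool.eq_iff_iff]
    simp only [decide_eq_true_eq, List.any_eq_true, List.all_eq_true, beq_iff_eq]
    constructor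
    · intro h2G
      refine ⟨G, ?_, ?_⟩
      · -- G ∈ range(2, m+1): G divides m (a member), m ≥ 1, so 2 ≤ G ≤ m
        have hGm : G ∣ m := pvFoldGcd_dvd_mem vals _ m hmmem
        have : G ≤ m := Int.le_of_dvd (by omega) hGm
        rw [PySem.List.mem_pyRange_one]
        omega
      · intro v hv
        exact (PySem.Int.mod_eq_zero_iff_dvd v G).mpr (pvFoldGcd_dvd_mem vals _ v hv)
    · rintro ⟨x, hxr, hxall⟩
      rw [PySem.List.mem_pyRange_one] at hxr
      have hxdvd : ∀ v ∈ vals, x ∣ v := fun v hv =>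
        (PySem.Int.mod_eq_zero_iff_dvd v x).mp (hxall v hv)
      have : x ∣ G := pvDvd_foldGcd vals _ x (hxdvd _ hg0mem) hxdvd
      have : x ≤ G := Int.le_of_dvd (by omega) this
      omega
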